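-- pv_equiv track=rewrite | github.com/t0r1n88/Lachesis | school_career_guidance/school_pup.py | processing_result_pup
-- ===== SOURCE A (Python) =====
-- def processing_result_pup(row):
--     """
-- Функция для вычисления итогового балла
-- """
--
--     # Создаем словарь для хранения данных
--     dct_type = {'Уверенность в будущем выборе': 0, 'Нерешительность в выборе профессии': 0}
--     lst_confidence = [1, 2, 4, 5, 7, 8, 9, 12, 13, 15, 17, 18, 19, 20, 22, 23]
--     lst_indecision = [0, 3, 6, 10, 11, 14, 16, 21]
--     for idx, value in enumerate(row):
--         if idx in lst_confidence:
--             dct_type['Уверенность в будущем выборе'] += value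
--         else:
--             dct_type['Нерешительность в выборе профессии'] += value
--
--     begin_str = (f'\nУверенность в будущем выборе: {dct_type["Уверенность в будущем выборе"]}\n'
--                  f'Нерешительность в выборе профессии: {dct_type["Нерешительность в выборе профессии"]}')
--     return begin_str
-- ===== SOURCE B (Python) =====
-- def processing_result_pup(row):
--     """Same result via one total and one subset sum: indecision = total - confidence."""
--     confidence_idx = frozenset([1, 2, 4, 5, 7, 8, 9, 12, 13, 15, 17, 18, 19, 20, 22, 23])
--     total = sum(row)
--     confidence = sum(v for i, v in enumerate(row) if i in confidence_idx)
--     indecision = total - confidence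
--     return (f'\nУверенность в будущем выборе: {confidence}\n'
--             f'Нерешительность в выборе профессии: {indecision}')
-- ===== Notes on version B (the rewrite author's own statement) =====
-- stated objective: faster
-- what changed: B replaces A's per-element two-accumulator dict classification loop with total = sum(row) plus one subset sum over the confidence indices (frozenset membership), deriving indecision by subtraction; the dict disappears.
import Mathlib
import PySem

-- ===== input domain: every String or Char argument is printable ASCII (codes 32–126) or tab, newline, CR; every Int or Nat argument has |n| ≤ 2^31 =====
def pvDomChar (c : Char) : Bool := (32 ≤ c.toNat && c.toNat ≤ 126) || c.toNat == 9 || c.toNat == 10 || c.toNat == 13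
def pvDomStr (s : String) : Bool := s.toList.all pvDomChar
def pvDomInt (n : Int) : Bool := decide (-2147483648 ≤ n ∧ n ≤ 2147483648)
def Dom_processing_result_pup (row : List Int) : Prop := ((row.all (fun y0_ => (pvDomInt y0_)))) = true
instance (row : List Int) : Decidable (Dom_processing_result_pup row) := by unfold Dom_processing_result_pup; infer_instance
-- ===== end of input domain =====

-- B replaces A's two-accumulator dict classification loop with total = sum(row) plus one
-- subset sum over the confidence indices, deriving indecision by subtraction (objective: simpler).

-- ===== PORT A =====
def pvKeyConf : String := "Уверенность в будущем выборе"
def pvKeyInd : String := "Нерешительность в выборе профессии"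
def pvLstConfidence : List Int := [1, 2, 4, 5, 7, 8, 9, 12, 13, 15, 17, 18, 19, 20, 22, 23]

def pvStepA (d : PySem.Dict String Int) (p : Int × Int) : PySem.Dict String Int :=
  if p.1 ∈ pvLstConfidence then
    d.insert pvKeyConf (d.getD pvKeyConf 0 + p.2)
  else
    d.insert pvKeyInd (d.getD pvKeyInd 0 + p.2)

def processing_result_pup (row : List Int) : String :=
  let dct := (PySem.List.enumerate row 0).foldl pvStepA
      (PySem.Dict.ofList [(pvKeyConf, 0), (pvKeyInd, 0)])
  "\nУверенность в будущем выборе: " ++ PySem.Int.toStr (dct.getD pvKeyConf 0) ++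
  "\nНерешительность в выборе профессии: " ++ PySem.Int.toStr (dct.getD pvKeyInd 0)

-- ===== PORT B =====
def pvConfidenceIdx : PySem.Set Int :=
  PySem.Set.ofList [1, 2, 4, 5, 7, 8, 9, 12, 13, 15, 17, 18, 19, 20, 22, 23]

def processing_result_pup_alt (row : List Int) : String :=
  let total : Int := row.sum
  let confidence : Int :=
    (((PySem.List.enumerate row 0).filter (fun p => p.1 ∈ pvConfidenceIdx)).map (·.2)).sum
  let indecision : Int := total - confidence
  "\nУверенность в будущем выборе: " ++ PySem.Int.toStr confidence ++
  "\nНерешительность в выборе профессии: " ++ PySem.Int.toStr indecision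

-- ===== PRECONDITION & SPEC =====
def Spec_processing_result_pup (row : List Int) (out : String) : Prop := out = processing_result_pup_alt row
instance (row : List Int) (out : String) : Decidable (Spec_processing_result_pup row out) := by unfold Spec_processing_result_pup; infer_instance

-- ===== CLAIM (what is proved, stated in full; the proofs are below) =====
def Claim_equal_processing_result_pup : Prop := ∀ (row : List Int), Dom_processing_result_pup row → Spec_processing_result_pup row (processing_result_pup row)

-- ===== LEMMAS AND PROOFS =====

theorem pvKeys_ne : pvKeyConf ≠ pvKeyInd := by decide

-- A's loop, run from any dict: the two entries accumulate the two partitioned sums.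
theorem pvFoldA_getD (l : List (Int × Int)) (d : PySem.Dict String Int) :
    ((l.foldl pvStepA d).getD pvKeyConf 0
      = d.getD pvKeyConf 0 + ((l.filter (fun p => decide (p.1 ∈ pvLstConfidence))).map (·.2)).sum)
    ∧ ((l.foldl pvStepA d).getD pvKeyInd 0
      = d.getD pvKeyInd 0 + ((l.filter (fun p => !decide (p.1 ∈ pvLstConfidence))).map (·.2)).sum) := by
  induction l generalizing d with
  | nil => simp
  | cons p l ih =>
    simp only [List.foldl_cons, List.filter_cons, pvStepA]
    by_cases h : p.1 ∈ pvLstConfidence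
    · obtain ⟨h1, h2⟩ := ih (d.insert pvKeyConf (d.getD pvKeyConf 0 + p.2))
      rw [if_pos h]
      simp only [h, decide_true, Bool.not_true, if_true, Bool.false_eq_true, if_false,
        List.map_cons, List.sum_cons]
      refine ⟨?_, ?_⟩
      · rw [h1, PySem.Dict.getD_insert_self]; ring
      · rw [h2, PySem.Dict.getD_insert_of_ne _ _ _ (Ne.symm pvKeys_ne)]
    · obtain ⟨h1, h2⟩ := ih (d.insert pvKeyInd (d.getD pvKeyInd 0 + p.2))
      rw [if_neg h]
      simp only [h, decide_false, Bool.not_false, Bool.false_eq_true, if_false, if_true,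
        List.map_cons, List.sum_cons]
      refine ⟨?_, ?_⟩
      · rw [h1, PySem.Dict.getD_insert_of_ne _ _ _ pvKeys_ne]
      · rw [h2, PySem.Dict.getD_insert_self]; ring

-- the two partitioned sums add up to the sum of all second components
theorem pvPartition_sum (l : List (Int × Int)) :
    ((l.filter (fun p => decide (p.1 ∈ pvLstConfidence))).map (·.2)).sum
      + ((l.filter (fun p => !decide (p.1 ∈ pvLstConfidence))).map (·.2)).sum
      = (l.map (·.2)).sum := by
  induction l with
  | nil => simp
  | cons p l ih =>
    cases h : decide (p.1 ∈ pvLstConfidence) <;>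
      simp only [List.filter_cons, h, Bool.not_true, Bool.not_false, Bool.false_eq_true,
        if_false, if_true, List.map_cons, List.sum_cons] <;> omega

theorem pvConfSet_mem (i : Int) : (i ∈ pvConfidenceIdx) ↔ (i ∈ pvLstConfidence) := by
  unfold pvConfidenceIdx pvLstConfidence
  rw [PySem.Set.mem_ofList]

-- ===== VERDICT (by name: the statement is the Claim_ definition above) =====
theorem processing_result_pup_spec : Claim_equal_processing_result_pup := by
  intro row _
  unfold Spec_processing_result_pup processing_result_pup processing_result_pup_alt
  dsimp only
  obtain ⟨h1, h2⟩ := pvFoldA_getD (PySem.List.enumerate row 0)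
      (PySem.Dict.ofList [(pvKeyConf, 0), (pvKeyInd, 0)])
  have hd0c : (PySem.Dict.ofList [(pvKeyConf, (0 : Int)), (pvKeyInd, 0)]).getD pvKeyConf 0 = 0 := by decide
  have hd0i : (PySem.Dict.ofList [(pvKeyConf, (0 : Int)), (pvKeyInd, 0)]).getD pvKeyInd 0 = 0 := by decide
  simp only [hd0c, hd0i, zero_add] at h1 h2
  have hsnd : ((PySem.List.enumerate row 0).map (·.2)).sum = row.sum := by
    rw [PySem.List.map_snd_enumerate]
  have hpart := pvPartition_sum (PySem.List.enumerate row 0)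
  have hfilter : ((PySem.List.enumerate row 0).filter (fun p => p.1 ∈ pvConfidenceIdx))
      = ((PySem.List.enumerate row 0).filter (fun p => p.1 ∈ pvLstConfidence)) := by
    apply List.filter_congr
    intro p _
    simp [pvConfSet_mem]
  rw [hfilter, h1, h2]
  congr 1
  congr 1
  omega
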